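-- pv_equiv track=rewrite | github.com/mlssymnkst/soa | backend/bot_routes.py | casar
-- ===== SOURCE A (Python) =====
-- def casar(user_input: str, opcoes: list):
--     """Casa input com opção da lista por índice, nome exato ou parcial."""
--     cleaned = user_input.strip()
--     if cleaned.isdigit():
--         idx = int(cleaned) - 1
--         if 0 <= idx < len(opcoes):
--             return opcoes[idx]
--     for opt in opcoes:
--         if opt.lower() == cleaned.lower():
--             return opt
--     for opt in opcoes:
--         if cleaned.lower() in opt.lower():
--             return opt
--     return None
-- ===== SOURCE B (Python) =====
-- def casar(user_input: str, opcoes: list):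
--     """Casa input com opcao da lista por indice, nome exato ou parcial."""
--     cleaned = user_input.strip()
--     if cleaned.isdigit():
--         idx = int(cleaned) - 1
--         if 0 <= idx < len(opcoes):
--             return opcoes[idx]
--     cl = cleaned.lower()
--     fallback = None
--     for opt in opcoes:
--         ol = opt.lower()
--         if ol == cl:
--             return opt
--         if fallback is None and cl in ol:
--             fallback = opt
--     return fallback
-- ===== Notes on version B (the rewrite author's own statement) =====
-- stated objective: faster
-- what changed: The two sequential scans (exact match, then partial match) are merged into one pass over opcoes that returns immediately on an exact match and remembers the first partial match in a fallback variable, with cleaned.lower() computed once before the loop instead of on every comparison.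
import Mathlib
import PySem

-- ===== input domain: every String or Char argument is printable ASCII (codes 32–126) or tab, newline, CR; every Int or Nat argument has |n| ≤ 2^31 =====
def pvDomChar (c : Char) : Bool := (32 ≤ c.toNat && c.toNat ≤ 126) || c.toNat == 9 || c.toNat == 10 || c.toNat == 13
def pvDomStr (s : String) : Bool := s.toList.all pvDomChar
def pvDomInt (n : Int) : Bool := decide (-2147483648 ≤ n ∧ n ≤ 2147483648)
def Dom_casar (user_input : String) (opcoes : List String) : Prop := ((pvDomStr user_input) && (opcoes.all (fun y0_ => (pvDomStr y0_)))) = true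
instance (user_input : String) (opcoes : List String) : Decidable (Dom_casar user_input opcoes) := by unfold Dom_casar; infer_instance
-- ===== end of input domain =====

-- B merges A's two sequential scans (exact, then partial) into one pass with a first-partial fallback variable; objective: alternative decomposition, same result.


-- ===== PORT A =====
-- ofStr? always returns some here because isdigit guarantees a nonempty digit string; getD 0 is never the default.
def casar (user_input : String) (opcoes : List String) : Option String :=
  let cleaned := PySem.Str.strip user_input
  let digitHit : Option String :=
    if PySem.Str.strIsdigit cleaned then
      let idx := (PySem.Int.ofStr? cleaned).getD 0 - 1
      if 0 ≤ idx ∧ idx < (opcoes.length : Int) then PySem.List.pyGet? opcoes idx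
      else none
    else none
  match digitHit with
  | some v => some v
  | none =>
    match opcoes.find? (fun opt => PySem.Str.lower opt == PySem.Str.lower cleaned) with
    | some v => some v
    | none => opcoes.find? (fun opt => PySem.Str.isIn (PySem.Str.lower cleaned) (PySem.Str.lower opt))

-- ===== PORT B =====
-- one pass: return on exact match, remember first partial match in `fb`
def casarAltLoop (cl : String) (fb : Option String) : List String → Option String
  | [] => fb
  | opt :: rest =>
    let ol := PySem.Str.lower opt
    if ol == cl then some opt
    else casarAltLoop cl (if fb.isNone && PySem.Str.isIn cl ol then some opt else fb) rest

def casar_alt (user_input : String) (opcoes : List String) : Option String :=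
  let cleaned := PySem.Str.strip user_input
  let digitHit : Option String :=
    if PySem.Str.strIsdigit cleaned then
      let idx := (PySem.Int.ofStr? cleaned).getD 0 - 1
      if 0 ≤ idx ∧ idx < (opcoes.length : Int) then PySem.List.pyGet? opcoes idx
      else none
    else none
  match digitHit with
  | some v => some v
  | none => casarAltLoop (PySem.Str.lower cleaned) none opcoes

-- ===== PRECONDITION & SPEC =====
def Spec_casar (user_input : String) (opcoes : List String) (out : Option String) : Prop := out = casar_alt user_input opcoes
instance (user_input : String) (opcoes : List String) (out : Option String) : Decidable (Spec_casar user_input opcoes out) := by unfold Spec_casar; infer_instance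

-- ===== CLAIM (what is proved, stated in full; the proofs are below) =====
def Claim_equal_casar : Prop := ∀ (user_input : String) (opcoes : List String), Dom_casar user_input opcoes → Spec_casar user_input opcoes (casar user_input opcoes)

-- ===== LEMMAS AND PROOFS =====
-- loop invariant: B's single pass = first exact match, else fb, else first partial match
theorem casarAltLoop_eq (cl : String) (fb : Option String) (l : List String) :
    casarAltLoop cl fb l =
      match l.find? (fun opt => PySem.Str.lower opt == cl) with
      | some v => some v
      | none => fb.or (l.find? (fun opt => PySem.Str.isIn cl (PySem.Str.lower opt))) := by
  induction l generalizing fb with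
  | nil => simp [casarAltLoop]
  | cons opt rest ih =>
    simp only [casarAltLoop, List.find?]
    by_cases hex : PySem.Str.lower opt == cl
    · simp [hex]
    · simp only [hex, if_false, Bool.false_eq_true, ih]
      cases hfind : rest.find? (fun opt => PySem.Str.lower opt == cl) with
      | some v => simp
      | none =>
        simp only
        by_cases hp : PySem.Chars.isIn cl.toList (PySem.Chars.lower opt.toList)
        · cases fb <;> simp [PySem.Str.isIn, hp, Option.or]
        · cases fb <;> simp [PySem.Str.isIn, hp]

-- ===== VERDICT (by name: the statement is the Claim_ definition above) =====
theorem casar_spec : Claim_equal_casar := by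
  intro user_input opcoes _
  unfold Spec_casar casar casar_alt
  simp only
  split
  · rfl
  · rw [casarAltLoop_eq]
    cases h : opcoes.find? (fun opt => PySem.Str.lower opt == PySem.Str.lower (PySem.Str.strip user_input)) <;> simp
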